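/- GENERATED by farm/mkstatement.py from design/units.tsv (unit `start_decoder.C2b`) and the assertions of Vorbis/Spec/StartDecoderC2.lean — do not edit.
   THE STATEMENT of the proof unit `start_decoder.C2b`: segment C2b of `start_decoder` (33 instructions; entries 0x1143aa;
   exits 0x113b22,0x1143f8,0x1144c2; ranges 0x1143aa-0x1143f3 + 0x11447e-0x11448f + 0x114494-0x1144a6 + 0x1144ab-0x1144bd)
   takes each of its entry assertions to one of its exit assertions (`Vorbis.Spec.StartDecoder.SegC2b`), given the contracts of its callees.
   What the names mean: Vorbis/Spec/Basic.lean (the shared hypotheses), Vorbis/Spec/StartDecoderC2.lean (the assertions). The theorem to prove: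
   `theorem start_decoder_C2b_ok : Vorbis.Spec.start_decoder_C2b.Statement`. -/
import Vorbis.Spec.Alloc
import Vorbis.Spec.Leaves
import Vorbis.Spec.Reader
import Vorbis.Spec.StartDecoderC2
namespace Vorbis.Spec.start_decoder_C2b
open X86 X86.User Asan

/-- The statement of unit `start_decoder.C2b`. -/
def Statement : Prop :=
  ∀ (Lay : Layout) (_hLay : Lay.hi = 0x1000000) (μ : Microarch) (_hμ : UserX.MicroOK μ) (u₀ : State)
    (_hcode : HasCodeNat Lay u₀ Vorbis.L.start_decoder.entry Vorbis.Code.code_start_decoder.nat Vorbis.L.start_decoder.size)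
    (_h_asan_load4_noabort : Asan.SmallCheck Lay μ Vorbis.WayInv (Vorbis.CodeOK u₀) [.rax, .rcx, .rdx] 4 Vorbis.L.__asan_load4_noabort.entry)
    (_h_get_bits : ∀ (others : List Obj) (frames : List (Nat × FrameLayout)) (Blk : Block → Prop) (len : Nat), Calls Lay μ Vorbis.WayInv (Vorbis.conv u₀) Vorbis.L.get_bits.entry (Vorbis.Spec.get_bits.spec others frames Blk len))
    (_h_asan_store1_noabort : Asan.SmallCheck Lay μ Vorbis.WayInv (Vorbis.CodeOK u₀) [.rax, .rdx] 1 Vorbis.L.__asan_store1_noabort.entry)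
    (_h_setup_temp_malloc : ∀ (others : List Obj) (frames : List (Nat × FrameLayout)) (A : Arena), Calls Lay μ Vorbis.WayInv (Vorbis.conv u₀) Vorbis.L.setup_temp_malloc.entry (Vorbis.Spec.setup_temp_malloc.spec others frames A))
    (_h_error : ∀ (others : List Obj) (frames : List (Nat × FrameLayout)), Calls Lay μ Vorbis.WayInv (Vorbis.conv u₀) Vorbis.L.error.entry (Vorbis.Spec.error.spec others frames))
    (_h_setup_malloc : ∀ (others : List Obj) (frames : List (Nat × FrameLayout)) (A : Arena), Calls Lay μ Vorbis.WayInv (Vorbis.conv u₀) Vorbis.L.setup_malloc.entry (Vorbis.Spec.setup_malloc.spec others frames A)),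
    Vorbis.Spec.StartDecoder.SegC2b Lay μ u₀

end Vorbis.Spec.start_decoder_C2b
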